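-- pv_equiv track=rewrite | github.com/NavidNaf/TheDamnVulnerableCodebase | Python/homomorphic.py | decrypt_masked
-- ===== SOURCE A (Python) =====
-- def decrypt_masked(c, p):
--     x = c % p
--     cond = 1 if x > (p >> 1) else 0  # 0 or 1
--
--     # do the same work regardless (always run loop)
--     y = x
--     for _ in range(2000):
--         y = (y * 3 + 1) % p
--     y = p - y
--
--     # select without if:  x = cond*y + (1-cond)*x
--     x = cond * y + (1 - cond) * x
--     return x & 1
-- ===== SOURCE B (Python) =====
-- def decrypt_masked(c, p):
--     x = c % p
--     if x <= p >> 1: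
--         return x % 2
--     t = 3 ** 2000
--     y = (t * x + (t - 1) // 2) % p
--     return (p - y) % 2
-- ===== Notes on version B (the rewrite author's own statement) =====
-- stated objective: faster
-- what changed: B early-returns x % 2 on the common branch and, on the other branch, replaces the 2000-iteration loop y=(3y+1)%p by its closed form ((3^2000)*x+(3^2000-1)//2)%p, returning (p-y)%2 directly with no branchless selection or bitwise AND.
-- outside the precondition, e.g. on decrypt_masked(3, 0): A raises ZeroDivisionError, B raises ZeroDivisionError
import Mathlib
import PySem

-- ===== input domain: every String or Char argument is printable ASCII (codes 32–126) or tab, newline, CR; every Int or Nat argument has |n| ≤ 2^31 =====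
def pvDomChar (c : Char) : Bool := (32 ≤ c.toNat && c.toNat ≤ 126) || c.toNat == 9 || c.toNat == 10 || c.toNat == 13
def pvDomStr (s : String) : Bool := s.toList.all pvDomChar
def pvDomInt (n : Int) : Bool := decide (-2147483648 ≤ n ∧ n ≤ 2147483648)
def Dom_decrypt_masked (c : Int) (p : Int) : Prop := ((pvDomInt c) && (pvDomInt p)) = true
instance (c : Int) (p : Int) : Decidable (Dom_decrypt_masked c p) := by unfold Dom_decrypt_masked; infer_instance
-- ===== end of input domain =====

-- B early-returns x % 2 on the low branch and otherwise uses the closed form of the 2000-step loop, returning (p - y) % 2 with no branchless selection.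

-- ===== PORT A =====
def decrypt_masked (c : Int) (p : Int) : Int :=
  let x := PySem.Int.mod c p
  let cond : Int := if x > (p >>> (1 : Nat)) then 1 else 0
  let y := (PySem.List.pyRange 0 2000 1).foldl (fun y _ => PySem.Int.mod (y * 3 + 1) p) x
  let y := p - y
  let x := cond * y + (1 - cond) * x
  PySem.Int.band x 1

-- ===== PORT B =====
def decrypt_masked_alt (c : Int) (p : Int) : Int :=
  let x := PySem.Int.mod c p
  if x ≤ (p >>> (1 : Nat)) then
    PySem.Int.mod x 2
  else
    let t : Int := 3 ^ (2000 : Nat)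
    let y := PySem.Int.mod (t * x + PySem.Int.floordiv (t - 1) 2) p
    PySem.Int.mod (p - y) 2

-- ===== PRECONDITION & SPEC =====
-- Pre_ excludes only p = 0, where Python's `c % p` raises ZeroDivisionError.
def Pre_decrypt_masked (c : Int) (p : Int) : Prop := p ≠ 0
instance (c : Int) (p : Int) : Decidable (Pre_decrypt_masked c p) := by unfold Pre_decrypt_masked; infer_instance
def pvWitness_decrypt_masked : Int × Int := (7, 5)

def Spec_decrypt_masked (c : Int) (p : Int) (out : Int) : Prop := out = decrypt_masked_alt c p
instance (c : Int) (p : Int) (out : Int) : Decidable (Spec_decrypt_masked c p out) := by unfold Spec_decrypt_masked; infer_instance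

-- ===== CLAIM (what is proved, stated in full; the proofs are below) =====
def Claim_equal_decrypt_masked : Prop := ∀ (c : Int) (p : Int), Dom_decrypt_masked c p → Pre_decrypt_masked c p → Spec_decrypt_masked c p (decrypt_masked c p)

-- ===== LEMMAS AND PROOFS =====

-- Python % p maps integers congruent mod p to the same value (p ≠ 0).
theorem pymod_congr (p a b : Int) (hp : p ≠ 0) (h : p ∣ a - b) :
    PySem.Int.mod a p = PySem.Int.mod b p := by
  have ha := PySem.Int.floordiv_mul_add_mod a p
  have hb := PySem.Int.floordiv_mul_add_mod b p
  have hd : p ∣ PySem.Int.mod a p - PySem.Int.mod b p := by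
    obtain ⟨k, hk⟩ := h
    exact ⟨k - PySem.Int.floordiv a p + PySem.Int.floordiv b p, by linarith [hk]⟩
  have habs : |PySem.Int.mod a p - PySem.Int.mod b p| < |p| := by
    rcases lt_or_gt_of_ne hp with hneg | hpos
    · have h1 := PySem.Int.mod_neg_bounds a hneg
      have h2 := PySem.Int.mod_neg_bounds b hneg
      rw [abs_of_neg hneg] at *
      rw [abs_lt]; omega
    · have h1a := PySem.Int.mod_nonneg a hpos
      have h1b := PySem.Int.mod_lt a hpos
      have h2a := PySem.Int.mod_nonneg b hpos
      have h2b := PySem.Int.mod_lt b hpos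
      rw [abs_of_pos hpos]; rw [abs_lt]; omega
  have := Int.eq_zero_of_abs_lt_dvd ((abs_dvd _ _).mpr hd) habs
  omega

-- x % p is a fixed point of % p.
theorem pymod_idem (p a : Int) (hp : p ≠ 0) :
    PySem.Int.mod (PySem.Int.mod a p) p = PySem.Int.mod a p := by
  have ha := PySem.Int.floordiv_mul_add_mod a p
  have := pymod_congr p (PySem.Int.mod a p) a hp ⟨-PySem.Int.floordiv a p, by linarith⟩
  omega

-- additive constant of the closed form: hAux n = (3^n - 1)/2
def hAux : Nat → Int
  | 0 => 0
  | n + 1 => 3 * hAux n + 1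

theorem hAux_spec (n : Nat) : 2 * hAux n + 1 = 3 ^ n := by
  induction n with
  | zero => simp [hAux]
  | succ n ih => rw [hAux, pow_succ]; linarith

-- a foldl that ignores the elements is function iteration
theorem foldl_const {α β : Type} (f : α → α) (l : List β) (x : α) :
    l.foldl (fun y _ => f y) x = f^[l.length] x := by
  induction l generalizing x with
  | nil => rfl
  | cons a l ih => simp [List.foldl_cons, ih, Function.iterate_succ_apply]

theorem loop_closed (p x : Int) (hp : p ≠ 0) (hx : PySem.Int.mod x p = x) (n : Nat) :
    (fun y => PySem.Int.mod (y * 3 + 1) p)^[n] x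
      = PySem.Int.mod (3 ^ n * x + hAux n) p := by
  induction n with
  | zero => simp [hAux, hx]
  | succ n ih =>
    rw [Function.iterate_succ_apply', ih]
    have hfix := PySem.Int.floordiv_mul_add_mod (3 ^ n * x + hAux n) p
    refine pymod_congr p _ _ hp ?_
    refine ⟨-3 * PySem.Int.floordiv (3 ^ n * x + hAux n) p, ?_⟩
    have : (3:Int) ^ (n+1) = 3 * 3 ^ n := by rw [pow_succ]; ring
    rw [this, hAux]
    linarith

theorem floordiv_two_mul (k : Int) : PySem.Int.floordiv (2 * k) 2 = k := by
  rw [PySem.Int.floordiv_eq_iff_of_pos (by norm_num)]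
  constructor <;> linarith

theorem len_pyRange_2000 : (PySem.List.pyRange 0 2000 1).length = 2000 := by
  rw [PySem.List.length_pyRange_one]; rfl

theorem decrypt_masked_spec : Claim_equal_decrypt_masked := by
  intro c p _ hp
  unfold Spec_decrypt_masked decrypt_masked decrypt_masked_alt
  simp only
  have hx : PySem.Int.mod (PySem.Int.mod c p) p = PySem.Int.mod c p := pymod_idem p c hp
  have hloop :
      (PySem.List.pyRange 0 2000 1).foldl (fun y _ => PySem.Int.mod (y * 3 + 1) p) (PySem.Int.mod c p)
        = PySem.Int.mod (3 ^ (2000:Nat) * PySem.Int.mod c p + PySem.Int.floordiv ((3:Int) ^ (2000:Nat) - 1) 2) p := by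
    rw [foldl_const (fun y => PySem.Int.mod (y * 3 + 1) p), len_pyRange_2000,
        loop_closed p (PySem.Int.mod c p) hp hx 2000]
    have h1 := hAux_spec 2000
    have h2 : (3:Int) ^ (2000:Nat) - 1 = 2 * hAux 2000 := by linarith
    rw [h2, floordiv_two_mul]
  rw [hloop]
  by_cases hcond : PySem.Int.mod c p > (p >>> (1 : Nat))
  · rw [if_pos hcond, if_neg (by omega)]
    rw [PySem.Int.band_one]
    ring_nf
  · rw [if_neg hcond, if_pos (by omega)]
    rw [PySem.Int.band_one]
    ring_nf

-- ===== VERDICT (by name: the statement is the Claim_ definition above) =====
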